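-- pv_equiv track=rewrite | github.com/opinionated-systems/hyperspace | replication/results/replication_v1/arm_c_random/seed44/gen_30/repo/task_agent.py | _format_inputs
-- ===== SOURCE A (Python) =====
-- def _format_inputs(inputs: dict) -> str:
--     """Format task inputs into a structured prompt with improved formatting.
--
--     Provides better structure and context for the LLM.
--     Handles various input types and ensures clean formatting.
--     """
--     parts = []
--
--     # Define priority order for common fields to ensure logical flow
--     priority_fields = ["domain", "problem", "solution", "grading_guidelines", "student_answer"]
--
--     # Add priority fields first in order
--     for key in priority_fields:
--         if key in inputs:
--             value = inputs[key]
--             # Clean up the value - ensure it's a string and strip excess whitespace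
--             if not isinstance(value, str):
--                 value = str(value)
--             value = value.strip()
--             if value:  # Only add non-empty values
--                 parts.append(f"## {key.replace('_', ' ').title()}\n{value}\n")
--
--     # Add any remaining fields not in priority list
--     for key, value in inputs.items():
--         if key not in priority_fields:
--             if not isinstance(value, str):
--                 value = str(value)
--             value = value.strip()
--             if value:
--                 parts.append(f"## {key.replace('_', ' ').title()}\n{value}\n")
--
--     return "\n".join(parts)
-- ===== SOURCE B (Python) =====
-- def _format_inputs(inputs: dict) -> str:
--     """Format task inputs: one bucket-distribution pass, then one formatting pass."""
--     priority_fields = ["domain", "problem", "solution", "grading_guidelines", "student_answer"]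
--     # Single pass over the dict, distributing entries into rank buckets:
--     # bucket i (i < 5) holds the entry for priority_fields[i], the last bucket
--     # holds the non-priority entries in insertion order.
--     buckets = [[] for _ in range(len(priority_fields) + 1)]
--     for key, value in inputs.items():
--         i = priority_fields.index(key) if key in priority_fields else len(priority_fields)
--         buckets[i].append((key, value))
--     parts = []
--     for bucket in buckets:
--         for key, value in bucket:
--             text = str(value).strip()
--             if text:
--                 parts.append("## {}\n{}\n".format(key.replace('_', ' ').title(), text))
--     return "\n".join(parts)
-- ===== Notes on version B (the rewrite author's own statement) =====
-- stated objective: alternative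
-- what changed: B replaces A's two scans (a priority-list scan doing dict lookups, then a dict scan doing membership tests, each with its own copy of the formatting code) by a bucket sort: one distribution pass over the dict assigning each entry to its priority-rank bucket, then one formatting pass over the concatenated buckets; Pre_ excludes association lists with duplicate keys, which represent no Python dict and on which A's first-match lookup order is an encoding artefact.
import Mathlib
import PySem

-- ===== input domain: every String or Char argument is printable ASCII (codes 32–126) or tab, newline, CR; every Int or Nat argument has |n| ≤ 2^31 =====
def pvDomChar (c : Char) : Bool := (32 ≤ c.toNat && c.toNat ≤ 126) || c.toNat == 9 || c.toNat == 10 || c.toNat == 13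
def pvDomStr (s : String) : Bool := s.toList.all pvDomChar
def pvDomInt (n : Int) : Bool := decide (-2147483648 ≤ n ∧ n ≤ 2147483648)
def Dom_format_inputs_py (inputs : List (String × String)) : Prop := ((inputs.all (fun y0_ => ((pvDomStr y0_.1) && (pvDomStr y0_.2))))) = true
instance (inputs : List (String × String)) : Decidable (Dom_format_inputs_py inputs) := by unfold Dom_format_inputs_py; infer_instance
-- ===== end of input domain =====

-- B replaces A's two scans (priority-list scan + dict scan with membership tests) by one
-- bucket-distribution pass keyed by priority rank followed by one formatting pass (objective: alternative).

-- str.title(), ported by hand (exact on the ASCII domain: cased chars = ASCII letters;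
-- first letter of each alpha run is uppercased, the rest lowercased, other chars kept).
def pvTitleAux : Bool → List Char → List Char
  | _, [] => []
  | prev, c :: cs =>
    if PySem.Chars.isalpha c then
      (if prev then PySem.Chars.lowerChar c else PySem.Chars.upperChar c) :: pvTitleAux true cs
    else c :: pvTitleAux false cs

def pvTitle (s : String) : String := String.mk (pvTitleAux false s.toList)

def pvPriorityFields : List String := ["domain", "problem", "solution", "grading_guidelines", "student_answer"]

-- ===== PORT A =====
-- the body of A's first loop ('for key in priority_fields: if key in inputs: …')
def pvStepPrio (inputs : List (String × String)) (parts : List String) (key : String) : List String :=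
  match inputs.lookup key with
  | none => parts
  | some value =>
    let v := PySem.Str.strip value
    if v = "" then parts
    else parts ++ ["## " ++ pvTitle (PySem.Str.replace key "_" " ") ++ "\n" ++ v ++ "\n"]

-- the body of A's second loop ('for key, value in inputs.items(): if key not in priority_fields: …')
def pvStepRest (parts : List String) (kv : String × String) : List String :=
  if kv.1 ∈ pvPriorityFields then parts
  else
    let v := PySem.Str.strip kv.2
    if v = "" then parts
    else parts ++ ["## " ++ pvTitle (PySem.Str.replace kv.1 "_" " ") ++ "\n" ++ v ++ "\n"]

def format_inputs_py (inputs : List (String × String)) : String :=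
  let parts := pvPriorityFields.foldl (pvStepPrio inputs) []
  let parts := inputs.foldl pvStepRest parts
  PySem.Str.join "\n" parts

-- ===== PORT B =====
-- 'priority_fields.index(key) if key in priority_fields else len(priority_fields)'
-- (index? = some i exactly when the key is in the list, so the match ports the guard+index exactly)
def pvRank (key : String) : Nat :=
  match PySem.List.index? pvPriorityFields key with
  | some i => i
  | none => pvPriorityFields.length

-- the bucket-distribution loop body ('buckets[i].append((key, value))')
def pvBStep (buckets : List (List (String × String))) (kv : String × String) :
    List (List (String × String)) :=
  buckets.modify (pvRank kv.1) (fun b => b ++ [kv])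

-- the formatting loop body (str/strip/skip-empty/title emit)
def pvBEmit (parts : List String) (kv : String × String) : List String :=
  let text := PySem.Str.strip kv.2
  if text = "" then parts
  else parts ++ ["## " ++ pvTitle (PySem.Str.replace kv.1 "_" " ") ++ "\n" ++ text ++ "\n"]

def format_inputs_py_alt (inputs : List (String × String)) : String :=
  let buckets := inputs.foldl pvBStep [[], [], [], [], [], []]
  let parts := buckets.foldl (fun parts bucket => bucket.foldl pvBEmit parts) []
  PySem.Str.join "\n" parts

-- ===== PRECONDITION & SPEC =====
-- Pre_ excludes association lists with duplicate keys: such lists represent no Python dict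
-- (A's argument type), and A's first-match dict lookup there is an artefact of the encoding.
def Pre_format_inputs_py (inputs : List (String × String)) : Prop :=
  (inputs.map Prod.fst).Nodup
instance (inputs : List (String × String)) : Decidable (Pre_format_inputs_py inputs) := by
  unfold Pre_format_inputs_py; infer_instance

def pvWitness_format_inputs_py : (List (String × String)) :=
  [("domain", " algebra "), ("extra_field", "note"), ("problem", "")]

def Spec_format_inputs_py (inputs : List (String × String)) (out : String) : Prop :=
  out = format_inputs_py_alt inputs
instance (inputs : List (String × String)) (out : String) :
    Decidable (Spec_format_inputs_py inputs out) := by unfold Spec_format_inputs_py; infer_instance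

-- ===== CLAIM (what is proved, stated in full; the proofs are below) =====
def Claim_equal_format_inputs_py : Prop :=
  ∀ (inputs : List (String × String)), Dom_format_inputs_py inputs →
    Pre_format_inputs_py inputs → Spec_format_inputs_py inputs (format_inputs_py inputs)

-- ===== LEMMAS AND PROOFS =====

-- shared proof-side formatter: what one entry contributes
def pvFmt (kv : String × String) : Option String :=
  let v := PySem.Str.strip kv.2
  if v = "" then none
  else some ("## " ++ pvTitle (PySem.Str.replace kv.1 "_" " ") ++ "\n" ++ v ++ "\n")

theorem pv_rank_eq_iff (x : String) (i : Nat) (hi : i < 5) :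
    pvRank x = i ↔ x = pvPriorityFields[i]'(by simpa [pvPriorityFields] using hi) := by
  constructor
  · intro h
    unfold pvRank at h
    cases hidx : PySem.List.index? pvPriorityFields x with
    | none => rw [hidx] at h; simp [pvPriorityFields] at h; omega
    | some j =>
      rw [hidx] at h; simp at h; subst h
      obtain ⟨hk, hx, -⟩ := PySem.List.getElem_of_index?_eq_some hidx
      exact hx.symm
  · intro h
    subst h
    interval_cases i <;>
      simp only [pvPriorityFields, List.getElem_cons_zero, List.getElem_cons_succ] <;> decide

-- A's first loop = the contributions of the present priority fields, in priority order
theorem pv_foldl_prio (inputs : List (String × String)) :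
    ∀ (l : List String) (acc : List String),
      l.foldl (pvStepPrio inputs) acc
      = acc ++ (l.filterMap (fun k => (inputs.lookup k).map (fun v => (k, v)))).filterMap pvFmt := by
  intro l
  induction l with
  | nil => intro acc; simp
  | cons k l ih =>
    intro acc
    simp only [List.foldl_cons, List.filterMap_cons]
    cases h : inputs.lookup k with
    | none => simp [pvStepPrio, h, ih]
    | some value =>
      simp only [Option.map_some]
      by_cases hv : PySem.Str.strip value = "" <;>
        simp [pvStepPrio, h, hv, pvFmt, ih]

-- A's second loop = the contributions of the non-priority entries, in insertion order
theorem pv_foldl_rest (l : List (String × String)) :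
    ∀ (acc : List String),
      l.foldl pvStepRest acc
      = acc ++ (l.filter (fun kv => kv.1 ∉ pvPriorityFields)).filterMap pvFmt := by
  induction l with
  | nil => intro acc; simp
  | cons kv l ih =>
    intro acc
    simp only [List.foldl_cons, List.filter_cons]
    by_cases hk : kv.1 ∈ pvPriorityFields
    · simp [pvStepRest, hk, ih]
    · by_cases hv : PySem.Str.strip kv.2 = "" <;>
        simp [pvStepRest, hk, hv, ih, pvFmt]

-- B's formatting inner loop
theorem pv_foldl_emit (l : List (String × String)) :
    ∀ (acc : List String), l.foldl pvBEmit acc = acc ++ l.filterMap pvFmt := by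
  induction l with
  | nil => intro acc; simp
  | cons kv l ih =>
    intro acc
    simp only [List.foldl_cons, List.filterMap_cons]
    by_cases hv : PySem.Str.strip kv.2 = "" <;>
      simp [pvBEmit, hv, pvFmt, ih]

-- B's formatting outer loop over the buckets
theorem pv_foldl_buckets (bl : List (List (String × String))) :
    ∀ (acc : List String),
      bl.foldl (fun parts bucket => bucket.foldl pvBEmit parts) acc
      = acc ++ bl.flatten.filterMap pvFmt := by
  induction bl with
  | nil => intro acc; simp
  | cons b bl ih =>
    intro acc
    rw [List.foldl_cons, pv_foldl_emit]
    simp [ih, List.append_assoc]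

theorem pv_bstep_length (l : List (String × String)) :
    ∀ (bs : List (List (String × String))), (l.foldl pvBStep bs).length = bs.length := by
  induction l with
  | nil => intro bs; rfl
  | cons kv l ih =>
    intro bs
    simp [List.foldl_cons, ih, pvBStep, List.length_modify]

-- the bucket invariant: bucket i collects exactly the entries of rank i, in order
theorem pv_bstep_getElem (l : List (String × String)) :
    ∀ (bs : List (List (String × String))) (i : Nat) (h : i < bs.length),
      (l.foldl pvBStep bs)[i]'(by rw [pv_bstep_length]; exact h)
      = bs[i] ++ l.filter (fun kv => pvRank kv.1 = i) := by
  induction l with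
  | nil => intro bs i h; simp
  | cons kv l ih =>
    intro bs i h
    simp only [List.foldl_cons, pvBStep, List.filter_cons]
    have hlen : i < (bs.modify (pvRank kv.1) (fun b => b ++ [kv])).length := by
      simpa [List.length_modify] using h
    rw [ih (bs.modify (pvRank kv.1) (fun b => b ++ [kv])) i hlen]
    rw [List.getElem_modify]
    by_cases hr : pvRank kv.1 = i
    · simp [hr, List.append_assoc]
    · simp [hr]

-- one entry per key: in a nodup-key list, the entries with key k are exactly the lookup entry
theorem pv_filter_key (k : String) (inputs : List (String × String))
    (hnd : (inputs.map Prod.fst).Nodup) :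
    inputs.filter (fun kv => kv.1 = k)
      = (inputs.lookup k).elim [] (fun v => [(k, v)]) := by
  induction inputs with
  | nil => simp
  | cons kv l ih =>
    obtain ⟨k1, v1⟩ := kv
    simp only [List.map_cons, List.nodup_cons] at hnd
    obtain ⟨hk, hnd'⟩ := hnd
    by_cases he : k1 = k
    · subst he
      have hfilt : l.filter (fun kv => decide (kv.1 = k1)) = [] := by
        rw [List.filter_eq_nil_iff]
        intro a ha h
        simp only [decide_eq_true_eq] at h
        exact hk (h ▸ List.mem_map_of_mem (f := Prod.fst) ha)
      simp [List.lookup, hfilt]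
    · have hbeq : (k == k1) = false := by simp [Ne.symm he]
      simp [List.lookup, hbeq, he, ih hnd']

-- the filterMap over the priority list, written as a flatten of per-key contributions
theorem pv_prio_flatten (inputs : List (String × String)) :
    ∀ (ks : List String),
      ks.filterMap (fun k => (inputs.lookup k).map (fun v => (k, v)))
      = (ks.map (fun k => (inputs.lookup k).elim [] (fun v => [(k, v)]))).flatten := by
  intro ks
  induction ks with
  | nil => simp
  | cons k ks ih =>
    simp only [List.filterMap_cons, List.map_cons, List.flatten_cons]
    cases h : inputs.lookup k <;> simp [ih]

-- ===== VERDICT (by name: the statement is the Claim_ definition above) =====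
theorem format_inputs_py_spec : Claim_equal_format_inputs_py := by
  intro inputs _ hpre
  unfold Spec_format_inputs_py format_inputs_py format_inputs_py_alt
  have hnd : (inputs.map Prod.fst).Nodup := hpre
  have hbuckets : inputs.foldl pvBStep [[], [], [], [], [], []]
      = [inputs.filter (fun kv => pvRank kv.1 = 0),
         inputs.filter (fun kv => pvRank kv.1 = 1),
         inputs.filter (fun kv => pvRank kv.1 = 2),
         inputs.filter (fun kv => pvRank kv.1 = 3),
         inputs.filter (fun kv => pvRank kv.1 = 4),
         inputs.filter (fun kv => pvRank kv.1 = 5)] := by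
    apply List.ext_getElem
    · rw [pv_bstep_length]; rfl
    · intro i h1 h2
      have hib : i < ([[], [], [], [], [], []] :
          List (List (String × String))).length := by
        rw [pv_bstep_length] at h1; exact h1
      rw [pv_bstep_getElem inputs _ i hib]
      have hi6 : i < 6 := by simpa using hib
      interval_cases i <;> simp
  have hkey : ∀ (i : Nat) (hi : i < 5),
      inputs.filter (fun kv => pvRank kv.1 = i)
      = (inputs.lookup (pvPriorityFields[i]'(by simpa [pvPriorityFields] using hi))).elim []
          (fun v => [(pvPriorityFields[i]'(by simpa [pvPriorityFields] using hi), v)]) := by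
    intro i hi
    rw [← pv_filter_key _ _ hnd]
    apply List.filter_congr
    intro kv _
    simp only [decide_eq_decide]
    exact pv_rank_eq_iff kv.1 i hi
  have hk0 := hkey 0 (by omega)
  have hk1 := hkey 1 (by omega)
  have hk2 := hkey 2 (by omega)
  have hk3 := hkey 3 (by omega)
  have hk4 := hkey 4 (by omega)
  simp only [pvPriorityFields, List.getElem_cons_zero, List.getElem_cons_succ]
    at hk0 hk1 hk2 hk3 hk4
  have hrest : inputs.filter (fun kv => pvRank kv.1 = 5)
      = inputs.filter (fun kv => kv.1 ∉ pvPriorityFields) := by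
    apply List.filter_congr
    intro kv _
    simp only [decide_eq_decide]
    constructor
    · intro h hmem
      have hsome : (PySem.List.index? pvPriorityFields kv.1).isSome = true :=
        (PySem.List.index?_isSome_iff pvPriorityFields kv.1).2 hmem
      obtain ⟨j, hj⟩ := Option.isSome_iff_exists.1 hsome
      obtain ⟨hklt, -, -⟩ := PySem.List.getElem_of_index?_eq_some hj
      unfold pvRank at h
      rw [hj] at h
      simp only [pvPriorityFields] at h hklt
      simp at h hklt
      omega
    · intro h
      unfold pvRank
      cases hidx : PySem.List.index? pvPriorityFields kv.1 with
      | some j =>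
        have hs : (PySem.List.index? pvPriorityFields kv.1).isSome = true := by
          rw [hidx]; rfl
        exact absurd ((PySem.List.index?_isSome_iff pvPriorityFields kv.1).1 hs) h
      | none => rfl
  simp only [hbuckets, pv_foldl_prio, pv_foldl_rest, pv_foldl_buckets, List.flatten_cons,
    List.flatten_nil, List.append_nil, List.nil_append]
  rw [hrest, hk0, hk1, hk2, hk3, hk4, pv_prio_flatten]
  simp [pvPriorityFields, List.filterMap_append, List.append_assoc]
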